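-- pv_equiv track=rewrite | github.com/eldimko/tic-tac-toe | stage5.py | not_finished
-- ===== SOURCE A (Python) =====
-- def not_finished(field):  # to check if the game is not finished
--     x = 0
--     y = 0
--
--     if any('_' in n for n in field):  # if contains empty cells
--         return True
--
--     while y in range(3):  # if any row has 3 in a row
--         if field[y][0] == field[y][1] == field[y][2]:
--             return False
--         y += 1
--
--     while x in range(3):  # if any column has 3 in a row
--         if field[0][x] == field[1][x] == field[2][x]:
--             return False
--         x += 1
--
--     if field[0][0] == field[1][1] == field[2][2]:  # if field has top-left-to-bottom-right X/O
--         return False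
--
--     if field[0][2] == field[1][1] == field[2][0]:  # if field has top-right-to-bottom-left X/O
--         return False
--
--     return True
-- ===== SOURCE B (Python) =====
-- WINS = (0b000000111, 0b000111000, 0b111000000,   # rows (bit 3*i+j for cell (i, j))
--         0b001001001, 0b010010010, 0b100100100,   # columns
--         0b100010001, 0b001010100)                # diagonals
--
--
-- def _mask(cells, v):  # 9-bit occupancy bitboard of symbol v
--     m = 0
--     for p, u in cells:
--         if u == v:
--             m |= 1 << p
--     return m
--
--
-- def not_finished(field):  # to check if the game is not finished
--     if any('_' in n for n in field):  # empty cells -> still in play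
--         return True
--     cells = [(3 * i + j, field[i][j]) for i in range(3) for j in range(3)]
--     symbols = {v for _, v in cells}
--     return not any(_mask(cells, v) & w == w for v in symbols for w in WINS)
-- ===== Notes on version B (the rewrite author's own statement) =====
-- stated objective: alternative
-- what changed: Replaces A's per-line equality scans (two while-loops over rows/columns plus two diagonal if-chains) with a bitboard representation: one pass indexes the board into a 9-bit occupancy mask per distinct symbol, and a win is detected as a bitwise superset test (m & w == w) against the eight constant winning masks.
-- outside the precondition, e.g. on not_finished([['x', 'x', 'x']]): A returns False, B raises IndexError
import Mathlib
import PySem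

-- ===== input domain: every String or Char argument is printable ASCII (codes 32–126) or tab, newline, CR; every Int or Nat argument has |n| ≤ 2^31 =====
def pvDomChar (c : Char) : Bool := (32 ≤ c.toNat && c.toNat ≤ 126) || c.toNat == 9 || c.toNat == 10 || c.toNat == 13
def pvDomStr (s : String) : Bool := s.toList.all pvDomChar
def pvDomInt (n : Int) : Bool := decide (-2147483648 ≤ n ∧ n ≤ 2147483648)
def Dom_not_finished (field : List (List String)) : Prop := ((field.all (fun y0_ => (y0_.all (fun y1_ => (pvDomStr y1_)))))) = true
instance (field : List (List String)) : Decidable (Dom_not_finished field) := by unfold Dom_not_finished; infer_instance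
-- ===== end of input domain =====

-- B keeps A's empty-cell guard but replaces A's per-line equality scans (two while-loops plus two
-- diagonal if-chains) by a bitboard: a 9-bit occupancy mask per distinct symbol, tested for
-- superset (m &&& w == w) against the eight constant winning masks (alternative algorithm; same cost).

-- ===== PORT A =====
-- field[y][x]; total with default "" — exact under Pre_ (indices 0..2 are in range there)
def nfCell (field : List (List String)) (y x : Nat) : String :=
  (field.getD y []).getD x ""

-- 'while y in range(3)' over the rows; false = an early 'return False', true = the loop ended
def nfRowWhile (field : List (List String)) (y : Nat) : Bool :=
  if y < 3 then
    if nfCell field y 0 == nfCell field y 1 && nfCell field y 1 == nfCell field y 2 then false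
    else nfRowWhile field (y + 1)
  else true
termination_by 3 - y

-- 'while x in range(3)' over the columns
def nfColWhile (field : List (List String)) (x : Nat) : Bool :=
  if x < 3 then
    if nfCell field 0 x == nfCell field 1 x && nfCell field 1 x == nfCell field 2 x then false
    else nfColWhile field (x + 1)
  else true
termination_by 3 - x

def not_finished (field : List (List String)) : Bool :=
  if field.any (fun n => n.contains "_") then true
  else if !(nfRowWhile field 0) then false
  else if !(nfColWhile field 0) then false
  else if nfCell field 0 0 == nfCell field 1 1 && nfCell field 1 1 == nfCell field 2 2 then false
  else if nfCell field 0 2 == nfCell field 1 1 && nfCell field 1 1 == nfCell field 2 0 then false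
  else true

-- ===== PORT B =====
-- WINS: bit 3*i+j stands for cell (i, j)
def nfWINS : List Nat := [7, 56, 448, 73, 146, 292, 273, 84]

-- _mask(cells, v): the 9-bit occupancy bitboard of symbol v
def nfMask (cells : List (Nat × String)) (v : String) : Nat :=
  cells.foldl (fun m pu => if pu.2 == v then m ||| (1 <<< pu.1) else m) 0

def not_finished_alt (field : List (List String)) : Bool :=
  if field.any (fun n => n.contains "_") then true
  else
    let cells := (List.range 3).flatMap (fun i => (List.range 3).map (fun j => (3 * i + j, nfCell field i j)))
    let symbols : PySem.Set String := PySem.Set.ofList (cells.map Prod.snd)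
    -- 'not any(... for v in symbols for w in WINS)': any over a set is order-independent
    !(symbols.any (fun v => nfWINS.any (fun w => (nfMask cells v &&& w) == w)))

-- ===== PRECONDITION & SPEC =====
-- Pre_ excludes boards with no empty cell whose first three rows are not all of length ≥ 3 (or with
-- fewer than 3 rows): A raises IndexError there, except when an earlier row happens to be a complete
-- line (e.g. [["x","x","x"]], where A returns False before indexing out of range) — that early return
-- is an accident of A's scan order and B raises IndexError there, so those inputs are excluded too.
def Pre_not_finished (field : List (List String)) : Prop :=
  (∃ row ∈ field, "_" ∈ row) ∨
  (3 ≤ field.length ∧ ∀ row ∈ field.take 3, 3 ≤ row.length)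
instance (field : List (List String)) : Decidable (Pre_not_finished field) := by
  unfold Pre_not_finished; infer_instance

def pvWitness_not_finished : List (List String) :=
  [["x", "o", "x"], ["o", "x", "o"], ["o", "x", "o"]]

def Spec_not_finished (field : List (List String)) (out : Bool) : Prop := out = not_finished_alt field
instance (field : List (List String)) (out : Bool) : Decidable (Spec_not_finished field out) := by unfold Spec_not_finished; infer_instance

-- ===== CLAIM (what is proved, stated in full; the proofs are below) =====
def Claim_equal_not_finished : Prop := ∀ (field : List (List String)), Dom_not_finished field → Pre_not_finished field → Spec_not_finished field (not_finished field)

-- ===== LEMMAS AND PROOFS =====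

theorem nfRowWhile_eval (f : List (List String)) :
    nfRowWhile f 0 =
      (!(nfCell f 0 0 == nfCell f 0 1 && nfCell f 0 1 == nfCell f 0 2) &&
       (!(nfCell f 1 0 == nfCell f 1 1 && nfCell f 1 1 == nfCell f 1 2) &&
        !(nfCell f 2 0 == nfCell f 2 1 && nfCell f 2 1 == nfCell f 2 2))) := by
  rw [nfRowWhile, nfRowWhile, nfRowWhile, nfRowWhile]
  norm_num
  simp [Bool.beq_eq_decide_eq]

theorem nfColWhile_eval (f : List (List String)) :
    nfColWhile f 0 =
      (!(nfCell f 0 0 == nfCell f 1 0 && nfCell f 1 0 == nfCell f 2 0) &&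
       (!(nfCell f 0 1 == nfCell f 1 1 && nfCell f 1 1 == nfCell f 2 1) &&
        !(nfCell f 0 2 == nfCell f 1 2 && nfCell f 1 2 == nfCell f 2 2))) := by
  rw [nfColWhile, nfColWhile, nfColWhile, nfColWhile]
  norm_num
  simp [Bool.beq_eq_decide_eq]

-- the superset tests against the eight winning masks, as a function of the nine membership bits
theorem nfWins_eval (b0 b1 b2 b3 b4 b5 b6 b7 b8 : Bool) :
    nfWINS.any (fun w =>
      (([((0:Nat),b0),(1,b1),(2,b2),(3,b3),(4,b4),(5,b5),(6,b6),(7,b7),(8,b8)].foldl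
          (fun m pu => if pu.2 then m ||| (1 <<< pu.1) else m) 0) &&& w) == w)
    = ((b0 && b1 && b2) || (b3 && b4 && b5) || (b6 && b7 && b8) ||
       (b0 && b3 && b6) || (b1 && b4 && b7) || (b2 && b5 && b8) ||
       (b0 && b4 && b8) || (b2 && b4 && b6)) := by
  revert b0 b1 b2 b3 b4 b5 b6 b7 b8; decide

-- a symbol of the board completes a line iff the three cells of the line are equal
theorem exists_line (l : List String) (x y z : String) (hx : x ∈ l) :
    (∃ v ∈ l, (x = v ∧ y = v) ∧ z = v) ↔ (x = y ∧ y = z) := by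
  constructor
  · rintro ⟨v, -, ⟨rfl, rfl⟩, rfl⟩; exact ⟨rfl, rfl⟩
  · rintro ⟨rfl, rfl⟩; exact ⟨x, hx, ⟨rfl, rfl⟩, rfl⟩

-- the any-over-the-symbol-set of line-completion tests, as the eight pairwise line equalities
theorem set_any_eval (a0 a1 a2 b0 b1 b2 c0 c1 c2 : String) :
    (PySem.Set.ofList [a0,a1,a2,b0,b1,b2,c0,c1,c2]).any (fun v =>
      ((a0==v && a1==v && a2==v) || (b0==v && b1==v && b2==v) || (c0==v && c1==v && c2==v) ||
       (a0==v && b0==v && c0==v) || (a1==v && b1==v && c1==v) || (a2==v && b2==v && c2==v) ||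
       (a0==v && b1==v && c2==v) || (a2==v && b1==v && c0==v)))
    = ((a0==a1 && a1==a2) || (b0==b1 && b1==b2) || (c0==c1 && c1==c2) ||
       (a0==b0 && b0==c0) || (a1==b1 && b1==c1) || (a2==b2 && b2==c2) ||
       (a0==b1 && b1==c2) || (a2==b1 && b1==c0)) := by
  rw [Bool.eq_iff_iff]
  simp only [List.any_eq_true, PySem.Set.mem_ofList, Bool.or_eq_true, Bool.and_eq_true,
    beq_iff_eq, and_or_left, exists_or]
  rw [exists_line _ a0 a1 a2 (by simp), exists_line _ b0 b1 b2 (by simp),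
      exists_line _ c0 c1 c2 (by simp), exists_line _ a0 b0 c0 (by simp),
      exists_line _ a1 b1 c1 (by simp), exists_line _ a2 b2 c2 (by simp),
      exists_line _ a0 b1 c2 (by simp), exists_line _ a2 b1 c0 (by simp)]

theorem not_finished_core (a0 a1 a2 b0 b1 b2 c0 c1 c2 : String)
    (ta tb tc : List String) (rest : List (List String))
    (hg : (((a0::a1::a2::ta)::(b0::b1::b2::tb)::(c0::c1::c2::tc)::rest).any
            (fun n => n.contains "_")) = false) :
    not_finished ((a0::a1::a2::ta)::(b0::b1::b2::tb)::(c0::c1::c2::tc)::rest)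
      = not_finished_alt ((a0::a1::a2::ta)::(b0::b1::b2::tb)::(c0::c1::c2::tc)::rest) := by
  have hgn : ¬ ((((a0::a1::a2::ta)::(b0::b1::b2::tb)::(c0::c1::c2::tc)::rest).any
      (fun n => n.contains "_")) = true) := by rw [hg]; exact Bool.false_ne_true
  unfold not_finished not_finished_alt
  rw [if_neg hgn, if_neg hgn, nfRowWhile_eval, nfColWhile_eval]
  have hcells : ((List.range 3).flatMap (fun i => (List.range 3).map (fun j =>
      (3 * i + j, nfCell ((a0::a1::a2::ta)::(b0::b1::b2::tb)::(c0::c1::c2::tc)::rest) i j))))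
      = [(0,a0),(1,a1),(2,a2),(3,b0),(4,b1),(5,b2),(6,c0),(7,c1),(8,c2)] := rfl
  simp only [hcells]
  have hmask : ∀ v, (nfMask [(0,a0),(1,a1),(2,a2),(3,b0),(4,b1),(5,b2),(6,c0),(7,c1),(8,c2)] v)
      = ([((0:Nat),a0==v),(1,a1==v),(2,a2==v),(3,b0==v),(4,b1==v),(5,b2==v),(6,c0==v),(7,c1==v),(8,c2==v)].foldl
          (fun m pu => if pu.2 then m ||| (1 <<< pu.1) else m) 0) := fun v => rfl
  simp only [hmask, nfWins_eval, List.map_cons, List.map_nil]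
  rw [set_any_eval]
  simp only [nfCell, List.getD_cons_zero, List.getD_cons_succ]
  generalize (a0 == a1) = e1
  generalize (a1 == a2) = e2
  generalize (b0 == b1) = e3
  generalize (b1 == b2) = e4
  generalize (c0 == c1) = e5
  generalize (c1 == c2) = e6
  generalize (a0 == b0) = e7
  generalize (b0 == c0) = e8
  generalize (a1 == b1) = e9
  generalize (b1 == c1) = e10
  generalize (a2 == b2) = e11
  generalize (b2 == c2) = e12
  generalize (a0 == b1) = e13
  generalize (b1 == c2) = e14
  generalize (a2 == b1) = e15
  generalize (b1 == c0) = e16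
  revert e1 e2 e3 e4 e5 e6 e7 e8 e9 e10 e11 e12 e13 e14 e15 e16
  decide

-- ===== VERDICT (by name: the statement is the Claim_ definition above) =====
theorem not_finished_spec : Claim_equal_not_finished := by
  intro field _ hPre
  unfold Spec_not_finished
  by_cases hg : (field.any (fun n => n.contains "_")) = true
  · unfold not_finished not_finished_alt
    rw [if_pos hg, if_pos hg]
  · have hg' : (field.any (fun n => n.contains "_")) = false := by
      simpa using hg
    rcases hPre with ⟨r, hr, hu⟩ | ⟨hlen, hrows⟩
    · exact absurd (List.any_eq_true.mpr ⟨r, hr, by simpa using hu⟩) hg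
    · rcases field with _ | ⟨a, _ | ⟨b, _ | ⟨c, rest⟩⟩⟩ <;> simp at hlen
      have ha : 3 ≤ a.length := hrows a (by simp)
      have hb : 3 ≤ b.length := hrows b (by simp)
      have hc : 3 ≤ c.length := hrows c (by simp)
      rcases a with _ | ⟨a0, _ | ⟨a1, _ | ⟨a2, ta⟩⟩⟩ <;> simp at ha
      rcases b with _ | ⟨b0, _ | ⟨b1, _ | ⟨b2, tb⟩⟩⟩ <;> simp at hb
      rcases c with _ | ⟨c0, _ | ⟨c1, _ | ⟨c2, tc⟩⟩⟩ <;> simp at hc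
      exact not_finished_core a0 a1 a2 b0 b1 b2 c0 c1 c2 ta tb tc rest hg'
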